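-- pv_equiv track=rewrite | github.com/rothtom/x | 6/pset/dna/dna.py | get_longest_match
-- ===== SOURCE A (Python) =====
-- def get_longest_match(sequence, subsequence):
--     """Returns length of longest run of subsequence in sequence."""
--
--     # Initialize variables
--     longest_run = 0
--     subsequence_length = len(subsequence)
--     sequence_length = len(sequence)
--
--     # Check each character in sequence for most consecutive runs of subsequence
--     for i in range(sequence_length):
--
--         # Initialize count of consecutive runs
--         count = 0
--
--         # Check for a subsequence match in a "substring" (a subset of characters) within sequence
--         # If a match, move substring to next potential match in sequence
--         # Continue moving substring and checking for matches until out of consecutive matches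
--         while True:
--
--             # Adjust substring start and end
--             start = i + count * subsequence_length
--             end = start + subsequence_length
--
--             # If there is a match in the substring
--             if sequence[start:end] == subsequence:
--                 count += 1
--
--             # If there is no match in the substring
--             else:
--                 break
--
--         # Update most consecutive matches found
--         longest_run = max(longest_run, count)
--
--     # After checking for runs at each character in seqeuence, return longest run found
--     return longest_run
-- ===== SOURCE B (Python) =====
-- def get_longest_match(sequence, subsequence):
--     """Returns length of longest run of subsequence in sequence."""
--     m = len(subsequence)
--     n = len(sequence)
--     # run[i] = number of consecutive copies of subsequence starting at i
--     run = [0] * (n + 1)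
--     best = 0
--     for i in range(n - m, -1, -1):
--         if sequence[i:i + m] == subsequence:
--             r = 1 + run[i + m]
--             run[i] = r
--             if r > best:
--                 best = r
--     return best
-- ===== Notes on version B (the rewrite author's own statement) =====
-- stated objective: faster
-- what changed: Replaces the per-start-index rescan (a while loop re-slicing forward from every i) by a single right-to-left dynamic-programming pass run[i] = 1 + run[i+m] on match, taking the max.
-- outside the precondition, e.g. on get_longest_match('A', ''): A does not finish within the time limit, B returns 1; on get_longest_match('', ''): A returns 0, B returns 1
import Mathlib
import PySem

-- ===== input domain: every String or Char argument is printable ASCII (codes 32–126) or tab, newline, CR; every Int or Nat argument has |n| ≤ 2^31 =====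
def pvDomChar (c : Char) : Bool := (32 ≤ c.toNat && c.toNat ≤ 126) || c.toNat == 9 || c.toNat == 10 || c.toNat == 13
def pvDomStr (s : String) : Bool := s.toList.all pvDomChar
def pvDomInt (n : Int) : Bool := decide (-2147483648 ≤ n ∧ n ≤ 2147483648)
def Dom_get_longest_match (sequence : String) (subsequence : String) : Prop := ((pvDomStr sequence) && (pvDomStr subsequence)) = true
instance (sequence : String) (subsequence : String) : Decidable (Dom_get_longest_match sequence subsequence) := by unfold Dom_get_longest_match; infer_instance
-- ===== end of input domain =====

-- B replaces A's per-start-index rescan (a 'while True' loop re-slicing forward from every i) by a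
-- single right-to-left dynamic-programming pass run[i] = 1 + run[i+m] on match, taking the max.

-- ===== PORT A =====
-- A's inner 'while True' loop, with fuel len(sequence)+1 (always enough iterations on Pre_;
-- Python's loop diverges only for subsequence = "", which Pre_ excludes)
def pvRunA (seq sub : List Char) (i : Int) : Nat → Int → Int
  | 0, count => count
  | fuel + 1, count =>
    if PySem.List.slice seq (some (i + count * (sub.length : Int)))
        (some (i + count * (sub.length : Int) + (sub.length : Int))) = sub then
      pvRunA seq sub i fuel (count + 1)
    else count

def get_longest_match (sequence : String) (subsequence : String) : Int :=
  (PySem.List.pyRange 0 (sequence.toList.length : Int) 1).foldl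
    (fun longest i =>
      max longest (pvRunA sequence.toList subsequence.toList i (sequence.toList.length + 1) 0)) 0

-- ===== PORT B =====
def get_longest_match_alt (sequence : String) (subsequence : String) : Int :=
  ((PySem.List.pyRange ((sequence.toList.length : Int) - (subsequence.toList.length : Int)) (-1) (-1)).foldl
      (fun (st : List Int × Int) i =>
        if PySem.List.slice sequence.toList (some i)
            (some (i + (subsequence.toList.length : Int))) = subsequence.toList then
          let r := 1 + PySem.List.pyGetD st.1 (i + (subsequence.toList.length : Int)) 0
          (st.1.set i.toNat r, if r > st.2 then r else st.2)
        else st)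
      (List.replicate (sequence.toList.length + 1) 0, 0)).2

-- ===== PRECONDITION & SPEC =====
-- Pre_ excludes the empty subsequence: there A's 'while True' never breaks (it diverges for nonempty
-- sequence, and for sequence = "" the corner is degenerate: A returns 0, B returns 1).
def Pre_get_longest_match (sequence : String) (subsequence : String) : Prop := subsequence ≠ ""
instance (sequence : String) (subsequence : String) : Decidable (Pre_get_longest_match sequence subsequence) := by unfold Pre_get_longest_match; infer_instance

def pvWitness_get_longest_match : String × String := ("AGATAGAT", "AGAT")

def Spec_get_longest_match (sequence : String) (subsequence : String) (out : Int) : Prop := out = get_longest_match_alt sequence subsequence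
instance (sequence : String) (subsequence : String) (out : Int) : Decidable (Spec_get_longest_match sequence subsequence out) := by unfold Spec_get_longest_match; infer_instance

-- ===== CLAIM (what is proved, stated in full; the proofs are below) =====
def Claim_equal_get_longest_match : Prop := ∀ (sequence : String) (subsequence : String), Dom_get_longest_match sequence subsequence → Pre_get_longest_match sequence subsequence → Spec_get_longest_match sequence subsequence (get_longest_match sequence subsequence)

-- ===== LEMMAS AND PROOFS =====

-- number of consecutive copies of sub starting at position j of seq (the common specification)
def pvR (seq sub : List Char) (j : Nat) : Int :=
  if h : sub ≠ [] ∧ (seq.drop j).take sub.length = sub then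
    pvR seq sub (j + sub.length) + 1
  else 0
termination_by seq.length - j
decreasing_by
  have h1 : 0 < sub.length := List.length_pos_iff.mpr h.1
  have h2 : ((seq.drop j).take sub.length).length = sub.length := by rw [h.2]
  simp only [List.length_take, List.length_drop] at h2
  omega

theorem pvR_zero_of_no_fit (seq sub : List Char) (j : Nat) (h : seq.length < j + sub.length) :
    pvR seq sub j = 0 := by
  rw [pvR, dif_neg]
  rintro ⟨h1, h2⟩
  have h3 : ((seq.drop j).take sub.length).length = sub.length := by rw [h2]
  have h4 : 0 < sub.length := List.length_pos_iff.mpr h1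
  simp only [List.length_take, List.length_drop] at h3
  omega

-- A's inner while loop computes count + pvR, given enough fuel
theorem runA_eq (seq sub : List Char) (hsub : sub ≠ []) :
    ∀ (fuel : Nat) (i count : Int), 0 ≤ i → 0 ≤ count →
      seq.length + 1 ≤ fuel + (i + count * (sub.length : Int)).toNat →
      pvRunA seq sub i fuel count = count + pvR seq sub (i + count * (sub.length : Int)).toNat := by
  intro fuel
  induction fuel with
  | zero =>
    intro i count hi hc hf
    have hm : 0 < sub.length := List.length_pos_iff.mpr hsub
    rw [pvRunA, pvR_zero_of_no_fit seq sub _ (by omega)]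
    omega
  | succ fuel ih =>
    intro i count hi hc hf
    have hm : 0 < sub.length := List.length_pos_iff.mpr hsub
    have hstart : 0 ≤ i + count * (sub.length : Int) :=
      add_nonneg hi (mul_nonneg hc (by positivity))
    set start := i + count * (sub.length : Int) with hstartdef
    have hslice : PySem.List.slice seq (some start) (some (start + (sub.length : Int)))
        = (seq.drop start.toNat).take sub.length := by
      rw [PySem.List.slice_toNat seq hstart (by omega)]
      congr 1
      omega
    rw [pvRunA, ← hstartdef]
    rw [hslice]
    by_cases hmatch : (seq.drop start.toNat).take sub.length = sub
    · rw [if_pos hmatch]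
      have hlen : ((seq.drop start.toNat).take sub.length).length = sub.length := by rw [hmatch]
      simp only [List.length_take, List.length_drop] at hlen
      have hexp : i + (count + 1) * (sub.length : Int) = start + (sub.length : Int) := by
        rw [hstartdef]; ring
      rw [ih i (count + 1) hi (by omega) (by rw [hexp]; omega)]
      rw [hexp]
      have hidx : (start + (sub.length : Int)).toNat = start.toNat + sub.length := by omega
      rw [hidx]
      conv_rhs => rw [pvR]
      rw [dif_pos ⟨hsub, hmatch⟩]
      omega
    · rw [if_neg hmatch]
      rw [pvR, dif_neg (by rintro ⟨_, h2⟩; exact hmatch h2)]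
      omega

-- folding max over a prefix of indices
def pvMax (seq sub : List Char) (k : Nat) : Int :=
  (List.range k).foldl (fun b j => max b (pvR seq sub j)) 0

theorem foldl_max_shift (g : Nat → Int) :
    ∀ (l : List Nat) (b x : Int),
      l.foldl (fun b j => max b (g j)) (max b x) = max (l.foldl (fun b j => max b (g j)) b) x := by
  intro l
  induction l with
  | nil => intro b x; rfl
  | cons a l ih =>
    intro b x
    simp only [List.foldl_cons]
    rw [max_right_comm, ih]

theorem le_foldl_maxg (g : Nat → Int) :
    ∀ (l : List Nat) (b : Int), b ≤ l.foldl (fun b j => max b (g j)) b := by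
  intro l
  induction l with
  | nil => intro b; exact le_refl b
  | cons a l ih =>
    intro b
    simp only [List.foldl_cons]
    exact le_trans (le_max_left _ _) (ih _)

theorem foldl_max_ext (g : Nat → Int) (k : Nat) (h0 : ∀ j, k ≤ j → g j = 0) :
    ∀ (d : Nat) (b : Int), 0 ≤ b →
      (List.range (k + d)).foldl (fun b j => max b (g j)) b
        = (List.range k).foldl (fun b j => max b (g j)) b := by
  intro d
  induction d with
  | zero => intro b _; rfl
  | succ d ih =>
    intro b hb
    have hkd : k + (d + 1) = (k + d) + 1 := by omega
    rw [hkd, List.range_succ, List.foldl_append, ih b hb]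
    simp only [List.foldl_cons, List.foldl_nil]
    rw [h0 (k + d) (by omega)]
    have := le_foldl_maxg g (List.range k) b
    omega

-- A equals the max of pvR over all start positions
theorem get_longest_match_eq_pvMax (sequence subsequence : String)
    (hsub : subsequence.toList ≠ []) :
    get_longest_match sequence subsequence
      = pvMax sequence.toList subsequence.toList sequence.toList.length := by
  unfold get_longest_match pvMax
  set seq := sequence.toList
  set sub := subsequence.toList
  rw [PySem.List.pyRange_zero_nat, List.foldl_map]
  have hfun : (fun (longest : Int) (j : Nat) =>
        max longest (pvRunA seq sub (j : Int) (seq.length + 1) 0))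
      = fun b j => max b (pvR seq sub j) := by
    funext b j
    have h := runA_eq seq sub hsub (seq.length + 1) (j : Int) 0 (by positivity) le_rfl
      (by simp)
    simp only [zero_mul, add_zero, Int.toNat_natCast, zero_add] at h
    rw [h]
  rw [hfun]

-- pyGetD on the all-zero table
theorem pyGetD_replicate_zero (t : Nat) (j : Nat) :
    PySem.List.pyGetD (List.replicate t (0 : Int)) (j : Int) 0 = 0 := by
  rw [PySem.List.pyGetD_natCast]
  by_cases h : j < t
  · rw [List.getD_eq_getElem _ _ (by simpa using h)]; simp
  · rw [List.getD_eq_default _ _ (by simpa using h)]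

-- B's loop invariant: processing indices k-1 down to 0 with a table correct at and above k
-- (and still zero below k) yields the max of pvR over [0, k) folded onto best
theorem loopB (seq sub : List Char) (hsub : sub ≠ []) :
    ∀ (k : Nat) (run : List Int) (best : Int),
      run.length = seq.length + 1 →
      k + sub.length ≤ seq.length + 1 →
      (∀ j : Nat, k ≤ j → PySem.List.pyGetD run (j : Int) 0 = pvR seq sub j) →
      (∀ j : Nat, j < k → PySem.List.pyGetD run (j : Int) 0 = 0) →
      0 ≤ best →
      ((PySem.List.pyRange ((k : Int) - 1) (-1) (-1)).foldl
        (fun (st : List Int × Int) i =>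
          if PySem.List.slice seq (some i) (some (i + (sub.length : Int))) = sub then
            let r := 1 + PySem.List.pyGetD st.1 (i + (sub.length : Int)) 0
            (st.1.set i.toNat r, if r > st.2 then r else st.2)
          else st)
        (run, best)).2
      = (List.range k).foldl (fun b j => max b (pvR seq sub j)) best := by
  intro k
  induction k with
  | zero =>
    intro run best _ _ _ _ _
    rw [PySem.List.pyRange_neg_one_eq_nil (by omega)]
    rfl
  | succ k ih =>
    intro run best hlen hk h2 h0 hbest
    have hm : 0 < sub.length := List.length_pos_iff.mpr hsub
    have hcast : ((k + 1 : Nat) : Int) - 1 = (k : Int) := by push_cast; ring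
    rw [hcast, PySem.List.pyRange_neg_one_cons (by omega), List.foldl_cons]
    have hslice : PySem.List.slice seq (some (k : Int)) (some ((k : Int) + (sub.length : Int)))
        = (seq.drop k).take sub.length := by
      rw [PySem.List.slice_toNat seq (by omega) (by omega)]
      congr 1
      omega
    simp only [hslice]
    rw [List.range_succ, List.foldl_append, List.foldl_cons, List.foldl_nil]
    by_cases hmatch : (seq.drop k).take sub.length = sub
    · rw [if_pos hmatch]
      have hR : pvR seq sub k = pvR seq sub (k + sub.length) + 1 := by
        rw [pvR, dif_pos ⟨hsub, hmatch⟩]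
      have hget : PySem.List.pyGetD run ((k : Int) + (sub.length : Int)) 0
          = pvR seq sub (k + sub.length) := by
        have hc : ((k : Int) + (sub.length : Int)) = ((k + sub.length : Nat) : Int) := by
          push_cast; ring
        rw [hc, h2 (k + sub.length) (by omega)]
      simp only [hget]
      set r := 1 + pvR seq sub (k + sub.length) with hrdef
      have hr : r = pvR seq sub k := by omega
      have hkn : k < run.length := by omega
      have hset : ∀ j : Nat, PySem.List.pyGetD (run.set ((k : Int)).toNat r) (j : Int) 0
          = if j = k then r else PySem.List.pyGetD run (j : Int) 0 := by
        intro j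
        rw [PySem.List.pyGetD_natCast, PySem.List.pyGetD_natCast, Int.toNat_natCast]
        by_cases hj : j = k
        · subst hj
          rw [if_pos rfl, List.getD_eq_getElem _ _ (by simpa using hkn)]
          simp
        · rw [if_neg hj]
          unfold List.getD
          rw [List.getElem?_set_ne (by omega)]
      have hbr : (if r > best then r else best) = max best r := by
        rcases lt_or_ge best r with h | h
        · rw [if_pos h, max_eq_right h.le]
        · rw [if_neg (not_lt.mpr h), max_eq_left h]
      rw [hbr]
      rw [ih (run.set ((k : Int)).toNat r) (max best r)
        (by simp [hlen]) (by omega)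
        (by
          intro j hj
          rw [hset j]
          by_cases hj' : j = k
          · rw [if_pos hj', hj']; exact hr
          · rw [if_neg hj']; exact h2 j (by omega))
        (by
          intro j hj
          rw [hset j, if_neg (by omega)]
          exact h0 j (by omega))
        (le_trans hbest (le_max_left _ _))]
      rw [hr, foldl_max_shift]
    · rw [if_neg hmatch]
      have hR : pvR seq sub k = 0 := by
        rw [pvR, dif_neg (by rintro ⟨_, h⟩; exact hmatch h)]
      rw [ih run best hlen (by omega)
        (by
          intro j hj
          by_cases hj' : j = k
          · rw [hj', h0 k (by omega), hR]
          · exact h2 j (by omega))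
        (fun j hj => h0 j (by omega)) hbest]
      rw [hR]
      have := le_foldl_maxg (fun j => pvR seq sub j) (List.range k) best
      omega

-- B equals the max of pvR over all start positions
theorem get_longest_match_alt_eq_pvMax (sequence subsequence : String)
    (hsub : subsequence.toList ≠ []) :
    get_longest_match_alt sequence subsequence
      = pvMax sequence.toList subsequence.toList sequence.toList.length := by
  unfold get_longest_match_alt pvMax
  set seq := sequence.toList
  set sub := subsequence.toList
  have hm : 0 < sub.length := List.length_pos_iff.mpr hsub
  by_cases hmn : sub.length ≤ seq.length
  · have hcast : (seq.length : Int) - (sub.length : Int)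
        = ((seq.length - sub.length + 1 : Nat) : Int) - 1 := by push_cast [hmn]; ring
    rw [hcast]
    rw [loopB seq sub hsub (seq.length - sub.length + 1) (List.replicate (seq.length + 1) 0) 0
      (by simp) (by omega)
      (by
        intro j hj
        rw [pyGetD_replicate_zero, pvR_zero_of_no_fit seq sub j (by omega)])
      (fun j _ => pyGetD_replicate_zero _ j) le_rfl]
    have hext := foldl_max_ext (fun j => pvR seq sub j) (seq.length - sub.length + 1)
      (fun j hj => pvR_zero_of_no_fit seq sub j (by omega)) (sub.length - 1) 0 le_rfl
    have hkd : seq.length - sub.length + 1 + (sub.length - 1) = seq.length := by omega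
    rw [hkd] at hext
    exact hext.symm
  · rw [PySem.List.pyRange_neg_one_eq_nil (by omega)]
    have hext := foldl_max_ext (fun j => pvR seq sub j) 0
      (fun j _ => pvR_zero_of_no_fit seq sub j (by omega)) seq.length 0 le_rfl
    rw [Nat.zero_add] at hext
    rw [hext]
    rfl

-- ===== VERDICT (by name: the statement is the Claim_ definition above) =====
theorem get_longest_match_spec : Claim_equal_get_longest_match := by
  intro sequence subsequence _ hpre
  unfold Spec_get_longest_match
  have hsub : subsequence.toList ≠ [] := by
    simpa [String.toList_eq_nil_iff] using hpre
  rw [get_longest_match_eq_pvMax sequence subsequence hsub,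
      get_longest_match_alt_eq_pvMax sequence subsequence hsub]
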